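-- pv_equiv track=rewrite | github.com/Liyunfan1998/CDN-simulation | cache_simulation_real_trace/utils.py | generateMapDict
-- ===== SOURCE A (Python) =====
-- def generateMapDict(lst):
--     countRepeatReq = generateCountDict(lst)
--     mapDict = {}
--     j = 0
--     for i in countRepeatReq:
--         mapDict[i[0]] = j
--         j += 1
--     return mapDict
--
-- def generateCountDict(lst):
--     countRepeatReq = {}
--     for req in lst:
--         if req in countRepeatReq:
--             countRepeatReq[req] += 1
--         else:
--             countRepeatReq[req] = 1
--     countRepeatReq = sorted(countRepeatReq.items(), key=lambda d: d[1], reverse=True)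
--     return countRepeatReq
-- ===== SOURCE B (Python) =====
-- def generateMapDict(lst):
--     # counting-sort by frequency: bucket keys per count, then walk counts from high to low
--     freq = {}
--     for req in lst:
--         freq[req] = freq.get(req, 0) + 1
--     buckets = {}
--     for k, c in freq.items():
--         buckets.setdefault(c, []).append(k)
--     mapDict = {}
--     j = 0
--     for c in range(len(lst), 0, -1):
--         for k in buckets.get(c, []):
--             mapDict[k] = j
--             j += 1
--     return mapDict
-- ===== Notes on version B (the rewrite author's own statement) =====
-- stated objective: alternative
-- what changed: Replaces A's stable comparison sort of the frequency table by a counting sort: keys are bucketed per count and emitted from the highest possible count (len(lst)) down to 1, reproducing the stable descending order.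
import Mathlib
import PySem

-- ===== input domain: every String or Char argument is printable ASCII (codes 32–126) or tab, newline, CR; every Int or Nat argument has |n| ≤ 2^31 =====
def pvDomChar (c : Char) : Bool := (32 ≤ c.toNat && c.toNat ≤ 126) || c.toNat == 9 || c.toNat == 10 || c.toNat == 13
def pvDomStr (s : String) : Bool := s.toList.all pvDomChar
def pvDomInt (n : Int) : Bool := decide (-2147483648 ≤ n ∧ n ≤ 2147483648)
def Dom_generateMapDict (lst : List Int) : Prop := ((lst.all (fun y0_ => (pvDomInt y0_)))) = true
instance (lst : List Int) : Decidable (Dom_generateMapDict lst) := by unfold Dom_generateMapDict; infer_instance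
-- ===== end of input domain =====

-- B replaces A's comparison sort of the frequency table by a counting sort: keys are
-- bucketed per count and emitted from the highest count down (objective: alternative).

-- ===== PORT A =====
def generateCountDict (lst : List Int) : List (Int × Int) :=
  let countRepeatReq := lst.foldl
    (fun d req =>
      if d.contains req then d.insert req (d.getD req 0 + 1) else d.insert req 1)
    (PySem.Dict.empty : PySem.Dict Int Int)
  PySem.List.sorted countRepeatReq.items (fun p => p.2) true

def generateMapDict (lst : List Int) : List (Int × Int) :=
  let countRepeatReq := generateCountDict lst
  (countRepeatReq.foldl
    (fun (st : PySem.Dict Int Int × Int) i => (st.1.insert i.1 st.2, st.2 + 1))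
    (PySem.Dict.empty, 0)).1.items

-- ===== PORT B =====
def generateMapDict_alt (lst : List Int) : List (Int × Int) :=
  let freq := lst.foldl
    (fun d req => d.insert req (d.getD req 0 + 1))
    (PySem.Dict.empty : PySem.Dict Int Int)
  let buckets := freq.items.foldl
    (fun (b : PySem.Dict Int (List Int)) p => b.modify p.2 [] (fun l => l ++ [p.1]))
    (PySem.Dict.empty : PySem.Dict Int (List Int))
  ((PySem.List.pyRange (lst.length : Int) 0 (-1)).foldl
    (fun (st : PySem.Dict Int Int × Int) c =>
      (buckets.getD c []).foldl
        (fun st k => (st.1.insert k st.2, st.2 + 1)) st)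
    (PySem.Dict.empty, 0)).1.items

-- ===== PRECONDITION & SPEC =====
def Spec_generateMapDict (lst : List Int) (out : List (Int × Int)) : Prop := out = generateMapDict_alt lst
instance (lst : List Int) (out : List (Int × Int)) : Decidable (Spec_generateMapDict lst out) := by unfold Spec_generateMapDict; infer_instance

-- ===== CLAIM (what is proved, stated in full; the proofs are below) =====
def Claim_equal_generateMapDict : Prop := ∀ (lst : List Int), Dom_generateMapDict lst → Spec_generateMapDict lst (generateMapDict lst)

-- ===== LEMMAS AND PROOFS =====

-- A's counting loop (if/else) is the unconditional getD+1 insert, i.e. Counter(lst).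
lemma countLoop_eq_counter (lst : List Int) :
    lst.foldl
      (fun d req =>
        if d.contains req then d.insert req (d.getD req 0 + 1) else d.insert req 1)
      (PySem.Dict.empty : PySem.Dict Int Int)
      = PySem.Dict.counter lst := by
  have h : ∀ (d : PySem.Dict Int Int) (req : Int),
      (if d.contains req then d.insert req (d.getD req 0 + 1) else d.insert req 1)
        = d.insert req (d.getD req 0 + 1) := by
    intro d req
    by_cases hc : d.contains req = true
    · simp [hc]
    · have hc' : d.contains req = false := by simpa using hc
      rw [PySem.Dict.getD_of_not_contains d 0 hc']
      simp [hc']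
  simp only [h]
  exact PySem.Dict.foldl_insert_getD_add_one_eq_counter lst

-- insertBy walks past a prefix it does not insert before
lemma insertBy_skip {α : Type} (before : α → α → Bool) (x : α) (l t : List α)
    (h : ∀ y ∈ l, before x y = false) :
    PySem.List.insertBy before x (l ++ t) = l ++ PySem.List.insertBy before x t := by
  induction l with
  | nil => simp
  | cons y ys ih =>
      have hy : before x y = false := h y (by simp)
      simp only [List.cons_append, PySem.List.insertBy, hy]
      simp [ih (fun z hz => h z (by simp [hz]))]

-- insertBy puts x at the front when it comes before everything
lemma insertBy_front {α : Type} (before : α → α → Bool) (x : α) (m : List α)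
    (h : ∀ y ∈ m, before x y = true) :
    PySem.List.insertBy before x m = x :: m := by
  cases m with
  | nil => rfl
  | cons y ys => simp [PySem.List.insertBy, h y (by simp)]

-- inserting x into a list bucketed by strictly decreasing key values appends x to its bucket
lemma insertBy_flatMap {α : Type} (key : α → Int) (vals : List Int) (F : Int → List α) (x : α)
    (hpw : vals.Pairwise (· > ·))
    (hF : ∀ v ∈ vals, ∀ y ∈ F v, key y = v)
    (hx : key x ∈ vals) :
    PySem.List.insertBy (fun a b => decide (key b < key a)) x (vals.flatMap F)
      = vals.flatMap (fun v => if v = key x then F v ++ [x] else F v) := by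
  induction vals with
  | nil => simp at hx
  | cons v rest ih =>
      have hgt : ∀ w ∈ rest, w < v := by
        intro w hw; exact (List.pairwise_cons.mp hpw).1 w hw
      have hpw' := (List.pairwise_cons.mp hpw).2
      have hFv : ∀ y ∈ F v, key y = v := hF v (by simp)
      simp only [List.flatMap_cons]
      by_cases hv : key x = v
      · -- x belongs to the head bucket: skip F v, then insert in front of the rest
        have hskip : ∀ y ∈ F v, (fun a b => decide (key b < key a)) x y = false := by
          intro y hy; simp [hFv y hy, hv]
        rw [insertBy_skip _ _ _ _ hskip]
        have hfront : ∀ y ∈ rest.flatMap F,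
            (fun a b => decide (key b < key a)) x y = true := by
          intro y hy
          rcases List.mem_flatMap.mp hy with ⟨w, hw, hyw⟩
          have : key y = w := hF w (by simp [hw]) y hyw
          simp [this, hv]; exact hgt w hw
        rw [insertBy_front _ _ _ hfront]
        have hrest : rest.flatMap (fun w => if w = key x then F w ++ [x] else F w)
            = rest.flatMap F := by
          apply List.flatMap_congr
          intro w hw
          have : w ≠ key x := by rw [hv]; exact ne_of_lt (hgt w hw)
          simp [this]
        rw [hrest, if_pos hv.symm]
        simp
      · -- x belongs to a later bucket
        have hx' : key x ∈ rest := by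
          rcases List.mem_cons.mp hx with h | h
          · exact absurd h hv
          · exact h
        have hlt : key x < v := hgt _ hx'
        have hskip : ∀ y ∈ F v, (fun a b => decide (key b < key a)) x y = false := by
          intro y hy
          simp [hFv y hy]; omega
        rw [insertBy_skip _ _ _ _ hskip, ih hpw' (fun w hw => hF w (by simp [hw])) hx',
          if_neg (fun h => hv h.symm)]

-- the grouping loop of B: bucket lookup = the keys whose count is c, in dict order
lemma getD_bucket_fold (l : List (Int × Int)) (d : PySem.Dict Int (List Int)) (c : Int) :
    (l.foldl (fun b p => b.modify p.2 [] (fun xs => xs ++ [p.1])) d).getD c []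
      = d.getD c [] ++ (l.filter (fun p => p.2 == c)).map (fun p => p.1) := by
  induction l generalizing d with
  | nil => simp
  | cons p t ih =>
      rw [List.foldl_cons, ih]
      by_cases hc : p.2 = c
      · simp [hc]
      · have hbe : ¬ (p.2 == c) = true := by simpa using hc
        have hc2 : ¬ c = p.2 := fun h => hc h.symm
        simp [hbe, PySem.Dict.getD_modify, hc2]

-- A's index-assignment loop over (key, count) pairs only reads the keys
lemma assign_fold_pairs (l : List (Int × Int)) (st : PySem.Dict Int Int × Int) :
    l.foldl (fun st i => (st.1.insert i.1 st.2, st.2 + 1)) st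
      = (l.map (fun p => p.1)).foldl (fun st k => (st.1.insert k st.2, st.2 + 1)) st := by
  rw [List.foldl_map]

-- stable reverse sort by an Int key = concatenation of the equal-key buckets,
-- taken along any strictly decreasing list of values covering all keys
lemma sorted_rev_buckets (items : List (Int × Int)) (vals : List Int)
    (hpw : vals.Pairwise (· > ·))
    (hmem : ∀ p ∈ items, p.2 ∈ vals) :
    PySem.List.sorted items (fun p => p.2) true
      = vals.flatMap (fun v => items.filter (fun p => p.2 == v)) := by
  induction items using List.reverseRecOn with
  | nil => exact (List.flatMap_eq_nil_iff.mpr (by simp)).symm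
  | append_singleton items p ih =>
      rw [PySem.List.sorted_rev_eq_foldl_insertBy, List.foldl_append, List.foldl_cons,
        List.foldl_nil, ← PySem.List.sorted_rev_eq_foldl_insertBy,
        ih (fun q hq => hmem q (by simp [hq]))]
      rw [insertBy_flatMap (fun q => q.2) vals
        (fun v => items.filter (fun q => q.2 == v)) p hpw
        (by intro v _ y hy; exact by simpa using (List.mem_filter.mp hy).2)
        (hmem p (by simp))]
      apply List.flatMap_congr
      intro v _
      by_cases hv : v = p.2
      · simp [hv]
      · have : ¬ (p.2 == v) = true := by simpa using fun h => hv h.symm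
        simp [hv, List.filter_append, this]

-- ===== VERDICT (by name: the statement is the Claim_ definition above) =====
theorem generateMapDict_spec : Claim_equal_generateMapDict := by
  intro lst _
  unfold Spec_generateMapDict generateMapDict generateMapDict_alt generateCountDict
  simp only [countLoop_eq_counter, PySem.Dict.foldl_insert_getD_add_one_eq_counter]
  set n : Int := (lst.length : Int) with hn
  set items := (PySem.Dict.counter lst).items with hitems
  -- every count is in range(n, 0, -1)
  have hmem : ∀ p ∈ items, p.2 ∈ PySem.List.pyRange n 0 (-1) := by
    intro p hp
    rw [hitems, PySem.Dict.items_counter] at hp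
    rcases List.mem_map.mp hp with ⟨k, hk, hkp⟩
    have hkl : k ∈ lst := by
      rw [← PySem.List.dedup_eq_ofList] at hk
      exact (PySem.List.mem_dedup lst k).mp hk
    have h1 : 1 ≤ lst.count k := List.one_le_count_iff.mpr hkl
    have h2 : lst.count k ≤ lst.length := List.count_le_length
    rw [PySem.List.mem_pyRange_neg_one, ← hkp]
    constructor
    · show (0 : Int) < (lst.count k : Int)
      exact_mod_cast h1
    · show (lst.count k : Int) ≤ n
      rw [hn]
      exact_mod_cast h2
  have hpw : (PySem.List.pyRange n 0 (-1)).Pairwise (· > ·) := by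
    rw [PySem.List.pyRange_neg_one_eq_reverse, List.pairwise_reverse]
    exact PySem.List.pairwise_lt_pyRange_one 1 (n + 1)
  -- bucket lookup = filter of the items by count
  have hbucket : ∀ c : Int,
      (items.foldl
        (fun (b : PySem.Dict Int (List Int)) p => b.modify p.2 [] (fun l => l ++ [p.1]))
        PySem.Dict.empty).getD c []
        = (items.filter (fun p => p.2 == c)).map (fun p => p.1) := by
    intro c
    simpa using getD_bucket_fold items PySem.Dict.empty c
  -- rewrite both sides as the same index-assignment fold over the same key list
  simp only [hbucket]
  rw [sorted_rev_buckets items (PySem.List.pyRange n 0 (-1)) hpw hmem,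
    assign_fold_pairs, List.map_flatMap, List.foldl_flatMap]
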